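-- pv_equiv track=rewrite | github.com/k-harada/AtCoder | ABC/ABC287/C.py | solve
-- ===== SOURCE A (Python) =====
-- class UnionFind:
--     def __init__(self, n):
--         self.par = [i for i in range(n + 1)]
--         self.rank = [0] * (n + 1)
--
--     # search
--     def find(self, x):
--         if self.par[x] == x:
--             return x
--         else:
--             self.par[x] = self.find(self.par[x])
--             return self.par[x]
--
--     # unite
--     def union(self, x, y):
--         x = self.find(x)
--         y = self.find(y)
--         if self.rank[x] < self.rank[y]:
--             self.par[x] = y
--         else:
--             self.par[y] = x
--             if self.rank[x] == self.rank[y]: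
--                 self.rank[x] += 1
--
--     # check
--     def same_check(self, x, y):
--         return self.find(x) == self.find(y)
--
-- def solve(n, m, uv_list):
--     if m != n - 1:
--         return "No"
--     degree = [0] * (n + 1)
--     for u, v in uv_list:
--         degree[u] += 1
--         degree[v] += 1
--     if max(degree) > 2:
--         return "No"
--     # connected or not
--     uf = UnionFind(n + 1)
--     for u, v in uv_list:
--         uf.union(u, v)
--     for i in range(2, n + 1):
--         if not uf.same_check(1, i):
--             return "No"
--     return "Yes"
-- ===== SOURCE B (Python) =====
-- def solve(n, m, uv_list):
--     if m != n - 1: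
--         return "No"
--     deg = {}
--     for u, v in uv_list:
--         for x in (u, v):
--             deg[x] = deg.get(x, 0) + 1
--     if any(d > 2 for d in deg.values()):
--         return "No"
--     comp = list(range(n + 1))
--     for u, v in uv_list:
--         cu, cv = comp[u], comp[v]
--         if cu != cv:
--             comp = [cu if c == cv else c for c in comp]
--     if all(comp[i] == comp[1] for i in range(2, n + 1)):
--         return "Yes"
--     return "No"
-- ===== Notes on version B (the rewrite author's own statement) =====
-- stated objective: simpler
-- what changed: Replaces the UnionFind class (parent/rank arrays, recursive find with path compression, pairwise same_check loop) by a flat component-label list merged by relabelling per edge, and the degree array by a dict of endpoint counts; the whole helper class disappears.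
-- outside the precondition, e.g. on solve(3, 2, [(1, 2), (2, -1)]): A returns 'No', B returns 'Yes'
import Mathlib
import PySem

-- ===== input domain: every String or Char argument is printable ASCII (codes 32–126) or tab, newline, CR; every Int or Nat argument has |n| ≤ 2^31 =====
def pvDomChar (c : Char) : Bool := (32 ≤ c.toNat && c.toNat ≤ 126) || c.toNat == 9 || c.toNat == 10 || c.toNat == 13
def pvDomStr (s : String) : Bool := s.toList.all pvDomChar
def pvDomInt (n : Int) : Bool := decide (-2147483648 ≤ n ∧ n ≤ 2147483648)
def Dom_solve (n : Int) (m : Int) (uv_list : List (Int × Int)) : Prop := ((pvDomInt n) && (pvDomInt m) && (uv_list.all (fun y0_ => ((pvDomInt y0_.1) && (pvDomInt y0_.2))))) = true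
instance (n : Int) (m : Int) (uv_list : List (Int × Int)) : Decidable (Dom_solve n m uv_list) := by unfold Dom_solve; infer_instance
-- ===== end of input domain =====

-- B replaces A's UnionFind class by per-edge relabelling of a flat component-label list
-- (and the degree array by a dict of endpoint counts): simpler, no helper class.
-- Equivalence is proved on Pre_solve; return value only (A mutates nothing observable).

-- ===== PORT A =====
-- UnionFind.find with path compression; fuel is only a totality guard for the
-- recursion (ample on every input Pre_solve admits, proved below).
def ufFind : Nat → List Int → Int → List Int × Int
  | 0, par, x => (par, x)
  | Nat.succ f, par, x =>
    let px := PySem.List.pyGetD par x 0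
    if px = x then (par, x)
    else
      let r := ufFind f par px
      let par2 := PySem.List.pySetD r.1 x r.2   -- self.par[x] = self.find(self.par[x])
      (par2, PySem.List.pyGetD par2 x 0)        -- return self.par[x]

-- UnionFind.union
def ufUnion (fuel : Nat) (par rank : List Int) (u v : Int) : List Int × List Int :=
  let f1 := ufFind fuel par u
  let x := f1.2
  let f2 := ufFind fuel f1.1 v
  let y := f2.2
  if PySem.List.pyGetD rank x 0 < PySem.List.pyGetD rank y 0 then
    (PySem.List.pySetD f2.1 x y, rank)
  else
    let par3 := PySem.List.pySetD f2.1 y x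
    if PySem.List.pyGetD rank x 0 = PySem.List.pyGetD rank y 0 then
      (par3, PySem.List.pySetD rank x (PySem.List.pyGetD rank x 0 + 1))
    else (par3, rank)

-- for i in range(2, n+1): if not uf.same_check(1, i): return "No"   (find mutates par)
def solveCheck (fuel : Nat) (par : List Int) : List Int → String
  | [] => "Yes"
  | i :: rest =>
    let f1 := ufFind fuel par 1
    let f2 := ufFind fuel f1.1 i
    if f1.2 = f2.2 then solveCheck fuel f2.1 rest else "No"

def solve (n : Int) (m : Int) (uv_list : List (Int × Int)) : String :=
  if m ≠ n - 1 then "No"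
  else
    let degree0 : List Int := List.replicate (n + 1).toNat 0
    let degree := uv_list.foldl (fun d p =>
        let d1 := PySem.List.pySetD d p.1 (PySem.List.pyGetD d p.1 0 + 1)
        PySem.List.pySetD d1 p.2 (PySem.List.pyGetD d1 p.2 0 + 1)) degree0
    if ((PySem.List.max? degree (fun x => x)).getD 0) > 2 then "No"  -- max(degree); [] excluded by Pre_
    else
      let par0 : List Int := PySem.List.pyRange 0 (n + 2) 1          -- UnionFind(n+1): range((n+1)+1)
      let rank0 : List Int := List.replicate (n + 2).toNat 0
      let fuel := uv_list.length + (n + 2).toNat + 2                 -- totality guard for find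
      let st := uv_list.foldl (fun s p => ufUnion fuel s.1 s.2 p.1 p.2) (par0, rank0)
      solveCheck fuel st.1 (PySem.List.pyRange 2 (n + 1) 1)

-- ===== PORT B =====
def solve_alt (n : Int) (m : Int) (uv_list : List (Int × Int)) : String :=
  if m ≠ n - 1 then "No"
  else
    let deg : PySem.Dict Int Int := uv_list.foldl (fun d p =>
        [p.1, p.2].foldl (fun d x => d.insert x (d.getD x 0 + 1)) d) PySem.Dict.empty
    if (PySem.Dict.values deg).any (fun dv => dv > 2) then "No"
    else
      let comp0 : List Int := PySem.List.pyRange 0 (n + 1) 1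
      let comp := uv_list.foldl (fun c p =>
          let cu := PySem.List.pyGetD c p.1 0
          let cv := PySem.List.pyGetD c p.2 0
          if cu ≠ cv then c.map (fun x => if x = cv then cu else x) else c) comp0
      if (PySem.List.pyRange 2 (n + 1) 1).all
          (fun i => decide (PySem.List.pyGetD comp i 0 = PySem.List.pyGetD comp 1 0))
      then "Yes" else "No"

-- ===== PRECONDITION & SPEC =====
-- When m = n-1, Pre_ excludes n < 0 and node labels > n (A raises ValueError/IndexError there)
-- and negative node labels, on which A returns only via Python's negative-index wraparound —
-- an accidental value (B's dict/label list wrap differently or not at all).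
def Pre_solve (n : Int) (m : Int) (uv_list : List (Int × Int)) : Prop :=
  m ≠ n - 1 ∨ (0 ≤ n ∧ ∀ p ∈ uv_list, 0 ≤ p.1 ∧ p.1 ≤ n ∧ 0 ≤ p.2 ∧ p.2 ≤ n)
instance (n : Int) (m : Int) (uv_list : List (Int × Int)) : Decidable (Pre_solve n m uv_list) := by
  unfold Pre_solve; infer_instance

def pvWitness_solve : Int × Int × (List (Int × Int)) := (3, 2, [(1, 2), (2, 3)])

def Spec_solve (n : Int) (m : Int) (uv_list : List (Int × Int)) (out : String) : Prop := out = solve_alt n m uv_list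
instance (n : Int) (m : Int) (uv_list : List (Int × Int)) (out : String) : Decidable (Spec_solve n m uv_list out) := by unfold Spec_solve; infer_instance

-- ===== CLAIM (what is proved, stated in full; the proofs are below) =====
def Claim_equal_solve : Prop := ∀ (n : Int) (m : Int) (uv_list : List (Int × Int)), Dom_solve n m uv_list → Pre_solve n m uv_list → Spec_solve n m uv_list (solve n m uv_list)

-- ===== LEMMAS AND PROOFS =====

-- pg l x = l[x] with default 0 (A and B read lists only through this pattern)
def pg (l : List Int) (x : Int) : Int := PySem.List.pyGetD l x 0

-- indices 0..L-1
def IR (L : Nat) (x : Int) : Prop := 0 ≤ x ∧ x < (L : Int)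

-- parent array maps the range into the range
def RC (L : Nat) (par : List Int) : Prop := par.length = L ∧ ∀ x, IR L x → IR L (pg par x)

-- follow parent pointers for at most k steps, stopping at a fixpoint
def chainRoot (par : List Int) : Int → Nat → Option Int
  | _, 0 => none
  | x, Nat.succ k => if pg par x = x then some x else chainRoot par (pg par x) k

def Root (par : List Int) (x r : Int) : Prop := ∃ k, chainRoot par x k = some r

def SameR (par : List Int) (x y : Int) : Prop := ∃ r, Root par x r ∧ Root par y r

-- rank strictly increases along parent pointers
def RKC (L : Nat) (par rank : List Int) : Prop :=
  ∀ x, IR L x → pg par x ≠ x → pg rank x < pg rank (pg par x)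

-- ranks lie in [0, c]
def RKB (L : Nat) (rank : List Int) (c : Int) : Prop :=
  ∀ x, IR L x → 0 ≤ pg rank x ∧ pg rank x ≤ c

lemma pg_oob (l : List Int) (y : Int) (h0 : 0 ≤ y) (h : (l.length : Int) ≤ y) : pg l y = 0 := by
  unfold pg PySem.List.pyGetD PySem.List.pyGet? PySem.List.pyIdx?
  rw [if_pos h0, if_neg (by omega)]
  rfl

lemma pg_set (l : List Int) (a v : Int) (ha0 : 0 ≤ a) (ha : a < (l.length : Int))
    (y : Int) (hy : 0 ≤ y) :
    pg (PySem.List.pySetD l a v) y = if y = a then v else pg l y := by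
  rw [show PySem.List.pySetD l a v = l.set a.toNat v from PySem.List.pySetD_of_nonneg l v ha0]
  by_cases hil : y < (l.length : Int)
  · unfold pg
    rw [PySem.List.pyGetD_eq_getElem _ _ hy (by rw [List.length_set]; exact hil)]
    rw [PySem.List.pyGetD_eq_getElem _ _ hy hil]
    rw [List.getElem_set]
    by_cases hya : y = a
    · rw [if_pos hya, if_pos (by omega)]
    · rw [if_neg hya, if_neg (by omega)]
  · have h1 : pg (l.set a.toNat v) y = 0 := pg_oob _ _ hy (by rw [List.length_set]; omega)
    have h2 : pg l y = 0 := pg_oob _ _ hy (by omega)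
    rw [h1, if_neg (by omega), h2]

lemma pg_range0 (b x : Int) (h0 : 0 ≤ x) (h : x < b) : pg (PySem.List.pyRange 0 b 1) x = x := by
  unfold pg
  rw [PySem.List.pyGetD_eq_getElem _ _ h0 (by rw [PySem.List.length_pyRange_one]; omega)]
  rw [PySem.List.getElem_pyRange_one 0 b x.toNat (by rw [PySem.List.length_pyRange_one]; omega)]
  omega

lemma pg_repl0 (k : Nat) (x : Int) (h0 : 0 ≤ x) : pg (List.replicate k (0 : Int)) x = 0 := by
  by_cases hil : x < ((List.replicate k (0 : Int)).length : Int)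
  · unfold pg
    rw [PySem.List.pyGetD_eq_getElem _ _ h0 hil]
    exact List.getElem_replicate _
  · exact pg_oob _ _ h0 (by omega)

lemma chainRoot_mono {par : List Int} {x : Int} {k : Nat} {r : Int}
    (h : chainRoot par x k = some r) : chainRoot par x (k + 1) = some r := by
  induction k generalizing x with
  | zero => simp [chainRoot] at h
  | succ k ih =>
    rw [chainRoot] at h
    rw [chainRoot]
    by_cases hp : pg par x = x
    · rwa [if_pos hp] at h ⊢
    · rw [if_neg hp] at h ⊢
      exact ih h

lemma chainRoot_le {par : List Int} {x : Int} {k k' : Nat} {r : Int}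
    (hk : k ≤ k') (h : chainRoot par x k = some r) : chainRoot par x k' = some r := by
  obtain ⟨d, rfl⟩ := Nat.exists_eq_add_of_le hk
  induction d with
  | zero => simpa using h
  | succ d ih => exact chainRoot_mono (ih (Nat.le_add_right k d))

lemma Root_unique {par : List Int} {x r s : Int} (h1 : Root par x r) (h2 : Root par x s) :
    r = s := by
  obtain ⟨k1, hk1⟩ := h1
  obtain ⟨k2, hk2⟩ := h2
  have e1 := chainRoot_le (Nat.le_max_left k1 k2) hk1
  have e2 := chainRoot_le (Nat.le_max_right k1 k2) hk2
  rw [e1] at e2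
  exact Option.some_inj.mp e2

lemma chainRoot_isRoot {par : List Int} {x : Int} {k : Nat} {r : Int}
    (h : chainRoot par x k = some r) : pg par r = r := by
  induction k generalizing x with
  | zero => simp [chainRoot] at h
  | succ k ih =>
    rw [chainRoot] at h
    by_cases hp : pg par x = x
    · rw [if_pos hp] at h
      obtain rfl := Option.some_inj.mp h
      exact hp
    · rw [if_neg hp] at h
      exact ih h

lemma Root_self {par : List Int} {x : Int} (h : pg par x = x) : Root par x x :=
  ⟨1, by simp [chainRoot, h]⟩

lemma Root_step {par : List Int} {x r : Int} (h : pg par x ≠ x) :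
    Root par x r ↔ Root par (pg par x) r := by
  constructor
  · rintro ⟨k, hk⟩
    cases k with
    | zero => simp [chainRoot] at hk
    | succ k =>
      rw [chainRoot, if_neg h] at hk
      exact ⟨k, hk⟩
  · rintro ⟨k, hk⟩
    exact ⟨k + 1, by rw [chainRoot, if_neg h]; exact hk⟩

lemma Root_of_fix {par : List Int} {r s : Int} (hr : pg par r = r) (h : Root par r s) : s = r :=
  Root_unique h (Root_self hr)

lemma Root_in_range {L : Nat} {par : List Int} (hrc : RC L par) {x r : Int}
    (hx : IR L x) (h : Root par x r) : IR L r := by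
  obtain ⟨k, hk⟩ := h
  induction k generalizing x with
  | zero => simp [chainRoot] at hk
  | succ k ih =>
    rw [chainRoot] at hk
    by_cases hp : pg par x = x
    · rw [if_pos hp] at hk
      obtain rfl := Option.some_inj.mp hk
      exact hx
    · rw [if_neg hp] at hk
      exact ih (hrc.2 x hx) hk

lemma reach_aux {L : Nat} {par rank : List Int} {c : Int}
    (hrc : RC L par) (hrkc : RKC L par rank) (hrkb : RKB L rank c) :
    ∀ (d : Nat) (x : Int), IR L x → (c + 1 - pg rank x).toNat ≤ d →
      ∃ r, chainRoot par x (d + 1) = some r := by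
  intro d
  induction d with
  | zero =>
    intro x hx hdx
    have := hrkb x hx
    omega
  | succ d ih =>
    intro x hx hdx
    by_cases hp : pg par x = x
    · exact ⟨x, by rw [chainRoot, if_pos hp]⟩
    · have hx' := hrc.2 x hx
      have hlt := hrkc x hx hp
      have hb := hrkb x hx
      have hb' := hrkb _ hx'
      obtain ⟨r, hr⟩ := ih (pg par x) hx' (by omega)
      exact ⟨r, by rw [chainRoot, if_neg hp]; exact hr⟩

lemma Root_total {L : Nat} {par rank : List Int} {c : Int}
    (hrc : RC L par) (hrkc : RKC L par rank) (hrkb : RKB L rank c) {x : Int} (hx : IR L x) :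
    ∃ r, chainRoot par x ((c + 1).toNat + 1) = some r := by
  have hb := hrkb x hx
  exact reach_aux hrc hrkc hrkb (c + 1).toNat x hx (by omega)

lemma chainRoot_fuel {L : Nat} {par rank : List Int} {c : Int}
    (hrc : RC L par) (hrkc : RKC L par rank) (hrkb : RKB L rank c) {x : Int} (hx : IR L x)
    {fuel : Nat} (hfuel : (c + 1).toNat + 1 ≤ fuel) :
    ∃ r, chainRoot par x fuel = some r := by
  obtain ⟨r, hr⟩ := Root_total hrc hrkc hrkb hx
  exact ⟨r, chainRoot_le hfuel hr⟩

lemma chain_rank_le {L : Nat} {par rank : List Int} (hrc : RC L par) (hrkc : RKC L par rank)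
    {x r : Int} {k : Nat} (hx : IR L x) (h : chainRoot par x k = some r) :
    pg rank x ≤ pg rank r := by
  induction k generalizing x with
  | zero => simp [chainRoot] at h
  | succ k ih =>
    rw [chainRoot] at h
    by_cases hp : pg par x = x
    · rw [if_pos hp] at h
      obtain rfl := Option.some_inj.mp h
      exact le_refl _
    · rw [if_neg hp] at h
      exact le_of_lt (lt_of_lt_of_le (hrkc x hx hp) (ih (hrc.2 x hx) h))

lemma chain_rank_lt {L : Nat} {par rank : List Int} (hrc : RC L par) (hrkc : RKC L par rank)
    {x r : Int} {k : Nat} (hx : IR L x) (hne : pg par x ≠ x) (h : chainRoot par x k = some r) :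
    pg rank x < pg rank r := by
  cases k with
  | zero => simp [chainRoot] at h
  | succ k =>
    rw [chainRoot, if_neg hne] at h
    exact lt_of_lt_of_le (hrkc x hx hne) (chain_rank_le hrc hrkc (hrc.2 x hx) h)

lemma RC_set {L : Nat} {par : List Int} (hrc : RC L par) {a v : Int}
    (ha : IR L a) (hv : IR L v) : RC L (PySem.List.pySetD par a v) := by
  refine ⟨by rw [PySem.List.length_pySetD]; exact hrc.1, ?_⟩
  intro x hx
  rw [pg_set par a v ha.1 (by rw [hrc.1]; exact ha.2) x hx.1]
  by_cases hxa : x = a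
  · rw [if_pos hxa]; exact hv
  · rw [if_neg hxa]; exact hrc.2 x hx

-- path compression step: writing a node's root into its slot preserves the Root relation
lemma root_set_fwd {L : Nat} {par : List Int} (hrc : RC L par) {a ra : Int}
    (ha : IR L a) (hra : Root par a ra) :
    ∀ (k : Nat) (y r : Int), IR L y →
      chainRoot (PySem.List.pySetD par a ra) y k = some r → Root par y r := by
  have hraIR : IR L ra := Root_in_range hrc ha hra
  have hfix : pg par ra = ra := by obtain ⟨k, hk⟩ := hra; exact chainRoot_isRoot hk
  have hpg : ∀ z : Int, 0 ≤ z →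
      pg (PySem.List.pySetD par a ra) z = if z = a then ra else pg par z :=
    fun z hz => pg_set par a ra ha.1 (by rw [hrc.1]; exact ha.2) z hz
  intro k
  induction k with
  | zero => intro y r hy hk; simp [chainRoot] at hk
  | succ k ih =>
    intro y r hy hk
    rw [chainRoot, hpg y hy.1] at hk
    by_cases hya : y = a
    · rw [if_pos hya] at hk
      by_cases hfa : ra = y
      · rw [if_pos hfa] at hk
        obtain rfl := Option.some_inj.mp hk
        have h' : Root par y ra := by rw [hya]; exact hra
        rw [hfa] at h'
        exact h'
      · rw [if_neg hfa] at hk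
        have hfa' : ra ≠ a := fun h => hfa (h.trans hya.symm)
        have hfix' : pg (PySem.List.pySetD par a ra) ra = ra := by
          rw [hpg ra hraIR.1, if_neg hfa']; exact hfix
        have hr : r = ra := Root_of_fix hfix' ⟨k, hk⟩
        rw [hr, hya]; exact hra
    · rw [if_neg hya] at hk
      by_cases hpy : pg par y = y
      · rw [if_pos hpy] at hk
        obtain rfl := Option.some_inj.mp hk
        exact Root_self hpy
      · rw [if_neg hpy] at hk
        exact (Root_step hpy).2 (ih (pg par y) r (hrc.2 y hy) hk)

lemma root_set_bwd {L : Nat} {par : List Int} (hrc : RC L par) {a ra : Int}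
    (ha : IR L a) (hra : Root par a ra) :
    ∀ (k : Nat) (y r : Int), IR L y →
      chainRoot par y k = some r → Root (PySem.List.pySetD par a ra) y r := by
  have hraIR : IR L ra := Root_in_range hrc ha hra
  have hfix : pg par ra = ra := by obtain ⟨k, hk⟩ := hra; exact chainRoot_isRoot hk
  have hpg : ∀ z : Int, 0 ≤ z →
      pg (PySem.List.pySetD par a ra) z = if z = a then ra else pg par z :=
    fun z hz => pg_set par a ra ha.1 (by rw [hrc.1]; exact ha.2) z hz
  -- the slot a points at its root afterwards, whose slot is unchanged (or ra = a)
  have hRa : Root (PySem.List.pySetD par a ra) a ra := by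
    by_cases hfa : ra = a
    · exact ⟨1, by rw [chainRoot, if_pos (by rw [hpg a ha.1, if_pos rfl]; exact hfa), hfa]⟩
    · refine ⟨2, ?_⟩
      rw [chainRoot, hpg a ha.1, if_pos rfl, if_neg hfa, chainRoot,
        hpg ra hraIR.1, if_neg hfa, if_pos hfix]
  intro k
  induction k with
  | zero => intro y r hy hk; simp [chainRoot] at hk
  | succ k ih =>
    intro y r hy hk
    rw [chainRoot] at hk
    by_cases hpy : pg par y = y
    · rw [if_pos hpy] at hk
      obtain rfl := Option.some_inj.mp hk
      by_cases hya : y = a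
      · have hpya : pg par a = a := by rw [← hya]; exact hpy
        have hray : ra = a := Root_of_fix hpya hra
        exact Root_self (by rw [hpg y hy.1, if_pos hya]; exact hray.trans hya.symm)
      · exact Root_self (by rw [hpg y hy.1, if_neg hya]; exact hpy)
    · rw [if_neg hpy] at hk
      by_cases hya : y = a
      · have hr : r = ra := Root_unique
          (show Root par a r by
            rw [← hya]; exact ⟨k + 1, by rw [chainRoot, if_neg hpy]; exact hk⟩) hra
        rw [hr, hya]; exact hRa
      · have hstep : pg (PySem.List.pySetD par a ra) y ≠ y := by
          rw [hpg y hy.1, if_neg hya]; exact hpy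
        have := ih (pg par y) r (hrc.2 y hy) hk
        rw [Root_step hstep, hpg y hy.1, if_neg hya]
        exact this

lemma Root_set_iff {L : Nat} {par : List Int} (hrc : RC L par) {a ra : Int}
    (ha : IR L a) (hra : Root par a ra) {y r : Int} (hy : IR L y) :
    Root (PySem.List.pySetD par a ra) y r ↔ Root par y r := by
  constructor
  · rintro ⟨k, hk⟩
    exact root_set_fwd hrc ha hra k y r hy hk
  · rintro ⟨k, hk⟩
    exact root_set_bwd hrc ha hra k y r hy hk

-- union step: pointing root r2 at root r1 redirects every class label r2 to r1
lemma root_reset_fwd {L : Nat} {par : List Int} (hrc : RC L par) {r1 r2 : Int}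
    (h1 : IR L r1) (h2 : IR L r2) (hf1 : pg par r1 = r1) (hf2 : pg par r2 = r2)
    (hne : r1 ≠ r2) :
    ∀ (k : Nat) (y r : Int), IR L y →
      chainRoot (PySem.List.pySetD par r2 r1) y k = some r →
      ∃ s, Root par y s ∧ r = (if s = r2 then r1 else s) := by
  have hpg : ∀ z : Int, 0 ≤ z →
      pg (PySem.List.pySetD par r2 r1) z = if z = r2 then r1 else pg par z :=
    fun z hz => pg_set par r2 r1 h2.1 (by rw [hrc.1]; exact h2.2) z hz
  intro k
  induction k with
  | zero => intro y r hy hk; simp [chainRoot] at hk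
  | succ k ih =>
    intro y r hy hk
    rw [chainRoot, hpg y hy.1] at hk
    by_cases hy2 : y = r2
    · rw [if_pos hy2] at hk
      have hne' : r1 ≠ y := by rw [hy2]; exact hne
      rw [if_neg hne'] at hk
      have hfix' : pg (PySem.List.pySetD par r2 r1) r1 = r1 := by
        rw [hpg r1 h1.1, if_neg hne]; exact hf1
      have hr : r = r1 := Root_of_fix hfix' ⟨k, hk⟩
      exact ⟨y, Root_self (by rw [hy2]; exact hf2), by rw [if_pos hy2]; exact hr⟩
    · rw [if_neg hy2] at hk
      by_cases hpy : pg par y = y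
      · rw [if_pos hpy] at hk
        obtain rfl := Option.some_inj.mp hk
        exact ⟨y, Root_self hpy, by rw [if_neg hy2]⟩
      · rw [if_neg hpy] at hk
        obtain ⟨s, hs, hrs⟩ := ih (pg par y) r (hrc.2 y hy) hk
        exact ⟨s, (Root_step hpy).2 hs, hrs⟩

lemma root_reset_bwd {L : Nat} {par : List Int} (hrc : RC L par) {r1 r2 : Int}
    (h1 : IR L r1) (h2 : IR L r2) (hf1 : pg par r1 = r1) (hf2 : pg par r2 = r2)
    (hne : r1 ≠ r2) :
    ∀ (k : Nat) (y s : Int), IR L y → chainRoot par y k = some s →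
      Root (PySem.List.pySetD par r2 r1) y (if s = r2 then r1 else s) := by
  have hpg : ∀ z : Int, 0 ≤ z →
      pg (PySem.List.pySetD par r2 r1) z = if z = r2 then r1 else pg par z :=
    fun z hz => pg_set par r2 r1 h2.1 (by rw [hrc.1]; exact h2.2) z hz
  have hR2 : Root (PySem.List.pySetD par r2 r1) r2 r1 := by
    refine ⟨2, ?_⟩
    rw [chainRoot, hpg r2 h2.1, if_pos rfl, if_neg hne, chainRoot,
      hpg r1 h1.1, if_neg hne, if_pos hf1]
  intro k
  induction k with
  | zero => intro y s hy hk; simp [chainRoot] at hk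
  | succ k ih =>
    intro y s hy hk
    rw [chainRoot] at hk
    by_cases hpy : pg par y = y
    · rw [if_pos hpy] at hk
      obtain rfl := Option.some_inj.mp hk
      by_cases hy2 : y = r2
      · rw [if_pos hy2, hy2]; exact hR2
      · rw [if_neg hy2]
        exact Root_self (by rw [hpg y hy.1, if_neg hy2]; exact hpy)
    · rw [if_neg hpy] at hk
      have hy2 : y ≠ r2 := fun h => hpy (by rw [h]; exact hf2)
      have hstep : pg (PySem.List.pySetD par r2 r1) y ≠ y := by
        rw [hpg y hy.1, if_neg hy2]; exact hpy
      have := ih (pg par y) s (hrc.2 y hy) hk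
      rw [Root_step hstep, hpg y hy.1, if_neg hy2]
      exact this

lemma Root_reset_iff {L : Nat} {par : List Int} (hrc : RC L par) {r1 r2 : Int}
    (h1 : IR L r1) (h2 : IR L r2) (hf1 : pg par r1 = r1) (hf2 : pg par r2 = r2)
    (hne : r1 ≠ r2) {y r : Int} (hy : IR L y) :
    Root (PySem.List.pySetD par r2 r1) y r ↔ ∃ s, Root par y s ∧ r = (if s = r2 then r1 else s) := by
  constructor
  · rintro ⟨k, hk⟩
    exact root_reset_fwd hrc h1 h2 hf1 hf2 hne k y r hy hk
  · rintro ⟨s, ⟨k, hk⟩, hrs⟩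
    rw [hrs]
    exact root_reset_bwd hrc h1 h2 hf1 hf2 hne k y s hy hk

lemma SameR_congr {L : Nat} {par par' : List Int}
    (hT : ∀ y, IR L y → ∀ s, (Root par' y s ↔ Root par y s))
    {x y : Int} (hx : IR L x) (hy : IR L y) : SameR par' x y ↔ SameR par x y := by
  unfold SameR
  constructor <;> rintro ⟨r, h1, h2⟩
  · exact ⟨r, (hT x hx r).1 h1, (hT y hy r).1 h2⟩
  · exact ⟨r, (hT x hx r).2 h1, (hT y hy r).2 h2⟩

lemma SameR_symm {par : List Int} {x y : Int} (h : SameR par x y) : SameR par y x := by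
  obtain ⟨r, h1, h2⟩ := h; exact ⟨r, h2, h1⟩

lemma SameR_trans {par : List Int} {x y z : Int} (h1 : SameR par x y) (h2 : SameR par y z) :
    SameR par x z := by
  obtain ⟨r, ha, hb⟩ := h1; obtain ⟨s, hc, hd⟩ := h2
  exact ⟨r, ha, Root_unique hc hb ▸ hd⟩

-- merging the classes with labels ra/rb (the roots of u and v): SameR afterwards
lemma SameR_merge_iff {L : Nat} {par par' : List Int} {ra rb u v ru rv : Int}
    (hT : ∀ y, IR L y → ∀ s, (Root par' y s ↔ ∃ t, Root par y t ∧ s = if t = rb then ra else t))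
    (hru : Root par u ru) (hrv : Root par v rv)
    (hcase : (ra = ru ∧ rb = rv) ∨ (ra = rv ∧ rb = ru)) (_hab : ra ≠ rb)
    (htot : ∀ y, IR L y → ∃ t, Root par y t)
    {x y : Int} (hx : IR L x) (hy : IR L y) :
    SameR par' x y ↔
      (SameR par x y ∨ (SameR par x u ∧ SameR par y v) ∨ (SameR par x v ∧ SameR par y u)) := by
  obtain ⟨tx, htx⟩ := htot x hx
  obtain ⟨ty, hty⟩ := htot y hy
  have hTx : Root par' x (if tx = rb then ra else tx) := (hT x hx _).2 ⟨tx, htx, rfl⟩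
  have hTy : Root par' y (if ty = rb then ra else ty) := (hT y hy _).2 ⟨ty, hty, rfl⟩
  have hL : SameR par' x y ↔ (if tx = rb then ra else tx) = (if ty = rb then ra else ty) := by
    constructor
    · rintro ⟨r, hr1, hr2⟩
      rw [← Root_unique hr1 hTx, ← Root_unique hr2 hTy]
    · intro h
      exact ⟨_, hTx, h ▸ hTy⟩
  have e1 : SameR par x y ↔ tx = ty := by
    constructor
    · rintro ⟨r, h1, h2⟩
      rw [← Root_unique h1 htx, ← Root_unique h2 hty]
    · intro h
      exact ⟨tx, htx, h ▸ hty⟩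
  have e2 : SameR par x u ↔ tx = ru := by
    constructor
    · rintro ⟨r, h1, h2⟩
      rw [← Root_unique h1 htx, Root_unique h2 hru]
    · intro h
      exact ⟨ru, h ▸ htx, hru⟩
  have e3 : SameR par y v ↔ ty = rv := by
    constructor
    · rintro ⟨r, h1, h2⟩
      rw [← Root_unique h1 hty, Root_unique h2 hrv]
    · intro h
      exact ⟨rv, h ▸ hty, hrv⟩
  have e4 : SameR par x v ↔ tx = rv := by
    constructor
    · rintro ⟨r, h1, h2⟩
      rw [← Root_unique h1 htx, Root_unique h2 hrv]
    · intro h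
      exact ⟨rv, h ▸ htx, hrv⟩
  have e5 : SameR par y u ↔ ty = ru := by
    constructor
    · rintro ⟨r, h1, h2⟩
      rw [← Root_unique h1 hty, Root_unique h2 hru]
    · intro h
      exact ⟨ru, h ▸ hty, hru⟩
  rw [hL, e1, e2, e3, e4, e5]
  rcases hcase with ⟨rfl, rfl⟩ | ⟨rfl, rfl⟩
  · by_cases h1 : tx = rb <;> by_cases h2 : ty = rb <;> simp [h1, h2] <;> omega
  · by_cases h1 : tx = rb <;> by_cases h2 : ty = rb <;> simp [h1, h2] <;> omega

-- the labelling view: a SameR-respecting labelling after a merge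
lemma label_merge (cu cv lx ly : Int) (_h : cu ≠ cv) :
    ((if lx = cv then cu else lx) = (if ly = cv then cu else ly)) ↔
      (lx = ly ∨ (lx = cu ∧ ly = cv) ∨ (lx = cv ∧ ly = cu)) := by
  by_cases h1 : lx = cv <;> by_cases h2 : ly = cv <;> simp [h1, h2] <;> omega

-- ===== find / union / check specifications =====

lemma ufFind_fix {f : Nat} {par : List Int} {x : Int} (h : PySem.List.pyGetD par x 0 = x) :
    ufFind (f + 1) par x = (par, x) := by
  simp [ufFind, h]

lemma ufFind_step {f : Nat} {par : List Int} {x : Int} (h : ¬ PySem.List.pyGetD par x 0 = x) :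
    ufFind (f + 1) par x =
      (PySem.List.pySetD (ufFind f par (PySem.List.pyGetD par x 0)).1 x
         (ufFind f par (PySem.List.pyGetD par x 0)).2,
       PySem.List.pyGetD
         (PySem.List.pySetD (ufFind f par (PySem.List.pyGetD par x 0)).1 x
           (ufFind f par (PySem.List.pyGetD par x 0)).2) x 0) := by
  simp [ufFind, h]

lemma find_spec {L : Nat} :
    ∀ (fuel : Nat) (par : List Int) (x r : Int), RC L par → IR L x →
      chainRoot par x fuel = some r →
      (ufFind fuel par x).2 = r ∧ RC L (ufFind fuel par x).1 ∧
      (∀ y, IR L y → ∀ s, (Root (ufFind fuel par x).1 y s ↔ Root par y s)) ∧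
      (∀ rank, RKC L par rank → RKC L (ufFind fuel par x).1 rank) := by
  intro fuel
  induction fuel with
  | zero => intro par x r _ _ hk; simp [chainRoot] at hk
  | succ f ih =>
    intro par x r hrc hx hk
    rw [chainRoot] at hk
    by_cases hp : pg par x = x
    · rw [if_pos hp] at hk
      obtain rfl := Option.some_inj.mp hk
      rw [ufFind_fix hp]
      exact ⟨rfl, hrc, fun y _ s => Iff.rfl, fun rank h => h⟩
    · rw [if_neg hp] at hk
      have hchain : chainRoot par x (f + 1) = some r := by
        rw [chainRoot, if_neg hp]; exact hk
      have hpxIR := hrc.2 x hx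
      obtain ⟨hval, hrc1, hpres1, hrkc1⟩ := ih par (pg par x) r hrc hpxIR hk
      have heq : ufFind (f + 1) par x =
          (PySem.List.pySetD (ufFind f par (pg par x)).1 x (ufFind f par (pg par x)).2,
           PySem.List.pyGetD
             (PySem.List.pySetD (ufFind f par (pg par x)).1 x (ufFind f par (pg par x)).2) x 0) :=
        ufFind_step hp
      rw [heq, hval]
      have hRpar : Root par x r := ⟨f + 1, hchain⟩
      have hrIR : IR L r := Root_in_range hrc hx hRpar
      have hRoot1 : Root (ufFind f par (pg par x)).1 x r := (hpres1 x hx r).2 hRpar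
      have hxlt : x < ((ufFind f par (pg par x)).1.length : Int) := by
        rw [hrc1.1]; exact hx.2
      have hgets : pg (PySem.List.pySetD (ufFind f par (pg par x)).1 x r) x
          = if x = x then r else pg (ufFind f par (pg par x)).1 x :=
        pg_set _ x r hx.1 hxlt x hx.1
      refine ⟨?_, ?_, ?_, ?_⟩
      · show pg (PySem.List.pySetD (ufFind f par (pg par x)).1 x r) x = r
        rw [hgets, if_pos rfl]
      · exact RC_set hrc1 hx hrIR
      · intro y hy s
        exact (Root_set_iff hrc1 hx hRoot1 hy).trans (hpres1 y hy s)
      · intro rank hrkcp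
        have hrkc1' := hrkc1 rank hrkcp
        intro y hy hney
        have hgy : pg (PySem.List.pySetD (ufFind f par (pg par x)).1 x r) y
            = if y = x then r else pg (ufFind f par (pg par x)).1 y :=
          pg_set _ x r hx.1 hxlt y hy.1
        by_cases hyx : y = x
        · rw [hgy, if_pos hyx]
          rw [hyx]
          exact chain_rank_lt hrc hrkcp hx hp hchain
        · rw [hgy, if_neg hyx]
          rw [hgy, if_neg hyx] at hney
          exact hrkc1' y hy hney

lemma union_spec {L : Nat} {par rank : List Int} {c : Int}
    (hrc : RC L par) (hrkc : RKC L par rank) (hrkb : RKB L rank c) (hlrk : rank.length = L)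
    {u v : Int} (hu : IR L u) (hv : IR L v)
    {fuel : Nat} (hfuel : (c + 1).toNat + 1 ≤ fuel) :
    RC L (ufUnion fuel par rank u v).1 ∧
    RKC L (ufUnion fuel par rank u v).1 (ufUnion fuel par rank u v).2 ∧
    RKB L (ufUnion fuel par rank u v).2 (c + 1) ∧
    (ufUnion fuel par rank u v).2.length = L ∧
    (∀ x y, IR L x → IR L y →
      (SameR (ufUnion fuel par rank u v).1 x y ↔
        (SameR par x y ∨ (SameR par x u ∧ SameR par y v) ∨ (SameR par x v ∧ SameR par y u)))) := by
  obtain ⟨ru, hcu⟩ := chainRoot_fuel hrc hrkc hrkb hu hfuel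
  obtain ⟨hval1, hrc1, hpres1, hrkc1f⟩ := find_spec fuel par u ru hrc hu hcu
  have hrkc1 : RKC L (ufFind fuel par u).1 rank := hrkc1f rank hrkc
  obtain ⟨rv, hcv⟩ := chainRoot_fuel hrc1 hrkc1 hrkb hv hfuel
  obtain ⟨hval2, hrc2, hpres2, hrkc2f⟩ := find_spec fuel (ufFind fuel par u).1 v rv hrc1 hv hcv
  have hrkc2 : RKC L (ufFind fuel (ufFind fuel par u).1 v).1 rank := hrkc2f rank hrkc1
  have hT2 : ∀ y, IR L y → ∀ s,
      (Root (ufFind fuel (ufFind fuel par u).1 v).1 y s ↔ Root par y s) :=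
    fun y hy s => (hpres2 y hy s).trans (hpres1 y hy s)
  have hRu : Root par u ru := ⟨fuel, hcu⟩
  have hRv : Root par v rv := (hpres1 v hv rv).1 ⟨fuel, hcv⟩
  have hruIR : IR L ru := Root_in_range hrc hu hRu
  have hrvIR : IR L rv := Root_in_range hrc hv hRv
  have hfix2u : pg (ufFind fuel (ufFind fuel par u).1 v).1 ru = ru := by
    obtain ⟨k, hk⟩ := (hT2 ru hruIR ru).2 (Root_self (chainRoot_isRoot hcu))
    exact chainRoot_isRoot hk
  have hfix2v : pg (ufFind fuel (ufFind fuel par u).1 v).1 rv = rv := by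
    obtain ⟨k, hk⟩ := (hT2 rv hrvIR rv).2
      (Root_self (by
        obtain ⟨k0, hk0⟩ := hRv
        exact chainRoot_isRoot hk0))
    exact chainRoot_isRoot hk
  have htot : ∀ y, IR L y → ∃ t, Root par y t := by
    intro y hy
    obtain ⟨t, ht⟩ := chainRoot_fuel hrc hrkc hrkb hy hfuel
    exact ⟨t, fuel, ht⟩
  have huvIff : SameR par u v ↔ ru = rv := by
    constructor
    · rintro ⟨r, h1, h2⟩
      rw [← Root_unique h1 hRu, Root_unique h2 hRv]
    · intro h
      exact ⟨rv, h ▸ hRu, hRv⟩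
  have hEq : ufUnion fuel par rank u v =
      if pg rank (ufFind fuel par u).2 < pg rank (ufFind fuel (ufFind fuel par u).1 v).2 then
        (PySem.List.pySetD (ufFind fuel (ufFind fuel par u).1 v).1 (ufFind fuel par u).2
           (ufFind fuel (ufFind fuel par u).1 v).2, rank)
      else if pg rank (ufFind fuel par u).2 = pg rank (ufFind fuel (ufFind fuel par u).1 v).2 then
        (PySem.List.pySetD (ufFind fuel (ufFind fuel par u).1 v).1
           (ufFind fuel (ufFind fuel par u).1 v).2 (ufFind fuel par u).2,
         PySem.List.pySetD rank (ufFind fuel par u).2 (pg rank (ufFind fuel par u).2 + 1))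
      else
        (PySem.List.pySetD (ufFind fuel (ufFind fuel par u).1 v).1
           (ufFind fuel (ufFind fuel par u).1 v).2 (ufFind fuel par u).2, rank) := rfl
  rw [hEq, hval1, hval2]
  have hlen2 : (ufFind fuel (ufFind fuel par u).1 v).1.length = L := hrc2.1
  split_ifs with h1 h2
  · -- rank[ru] < rank[rv] : par[ru] := rv
    have hne : rv ≠ ru := fun e => absurd h1 (by rw [e]; exact lt_irrefl _)
    have hreset : ∀ y, IR L y → ∀ s,
        (Root (PySem.List.pySetD (ufFind fuel (ufFind fuel par u).1 v).1 ru rv) y s ↔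
          ∃ t, Root par y t ∧ s = if t = ru then rv else t) := by
      intro y hy s
      refine (Root_reset_iff hrc2 hrvIR hruIR hfix2v hfix2u hne hy).trans ?_
      constructor
      · rintro ⟨t, ht, hts⟩
        exact ⟨t, (hT2 y hy t).1 ht, hts⟩
      · rintro ⟨t, ht, hts⟩
        exact ⟨t, (hT2 y hy t).2 ht, hts⟩
    refine ⟨RC_set hrc2 hruIR hrvIR, ?_, ?_, hlrk, ?_⟩
    · intro y hy hney
      have hgy : pg (PySem.List.pySetD (ufFind fuel (ufFind fuel par u).1 v).1 ru rv) y
          = if y = ru then rv else pg (ufFind fuel (ufFind fuel par u).1 v).1 y :=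
        pg_set _ ru rv hruIR.1 (by rw [hlen2]; exact hruIR.2) y hy.1
      rw [hgy] at hney ⊢
      by_cases hyr : y = ru
      · rw [if_pos hyr]
        rw [hyr]
        exact h1
      · rw [if_neg hyr] at hney ⊢
        exact hrkc2 y hy hney
    · intro y hy
      exact ⟨(hrkb y hy).1, le_trans (hrkb y hy).2 (by omega)⟩
    · intro x y hx hy
      exact SameR_merge_iff hreset hRu hRv (Or.inr ⟨rfl, rfl⟩) hne htot hx hy
  · -- rank[ru] = rank[rv] : par[rv] := ru, rank[ru] += 1
    have hlenrk : ru < (rank.length : Int) := by rw [hlrk]; exact hruIR.2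
    have hgrk : ∀ z : Int, 0 ≤ z →
        pg (PySem.List.pySetD rank ru (pg rank ru + 1)) z
          = if z = ru then pg rank ru + 1 else pg rank z :=
      fun z hz => pg_set rank ru (pg rank ru + 1) hruIR.1 hlenrk z hz
    have hgpar : ∀ z : Int, 0 ≤ z →
        pg (PySem.List.pySetD (ufFind fuel (ufFind fuel par u).1 v).1 rv ru) z
          = if z = rv then ru else pg (ufFind fuel (ufFind fuel par u).1 v).1 z :=
      fun z hz => pg_set _ rv ru hrvIR.1 (by rw [hlen2]; exact hrvIR.2) z hz
    have hRKB : RKB L (PySem.List.pySetD rank ru (pg rank ru + 1)) (c + 1) := by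
      intro y hy
      rw [hgrk y hy.1]
      by_cases hyr : y = ru
      · rw [if_pos hyr]
        have := hrkb ru hruIR
        omega
      · rw [if_neg hyr]
        have := hrkb y hy
        omega
    have hlrk' : (PySem.List.pySetD rank ru (pg rank ru + 1)).length = L := by
      rw [PySem.List.length_pySetD]; exact hlrk
    by_cases hrr : ru = rv
    · -- same root: the parent write is a no-op for the Root relation
      have hRrv : Root (ufFind fuel (ufFind fuel par u).1 v).1 rv ru := by
        rw [hrr]; exact Root_self hfix2v
      have hpres : ∀ y, IR L y → ∀ s,
          (Root (PySem.List.pySetD (ufFind fuel (ufFind fuel par u).1 v).1 rv ru) y s ↔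
            Root par y s) :=
        fun y hy s => (Root_set_iff hrc2 hrvIR hRrv hy).trans (hT2 y hy s)
      have huv : SameR par u v := huvIff.2 hrr
      refine ⟨RC_set hrc2 hrvIR hruIR, ?_, hRKB, hlrk', ?_⟩
      · intro y hy hney
        rw [hgpar y hy.1] at hney ⊢
        by_cases hyr : y = rv
        · exfalso
          rw [if_pos hyr] at hney
          exact hney (hrr.trans hyr.symm)
        · rw [if_neg hyr] at hney ⊢
          have hbase := hrkc2 y hy hney
          have hyru : y ≠ ru := by
            intro e
            exact hney (by rw [e]; exact hfix2u)
          rw [hgrk y hy.1, if_neg hyru]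
          by_cases hpr : pg (ufFind fuel (ufFind fuel par u).1 v).1 y = ru
          · rw [hgrk _ (le_trans hruIR.1 (le_of_eq hpr.symm)), if_pos hpr]
            rw [hpr] at hbase
            omega
          · rw [hgrk _ (hrc2.2 y hy).1, if_neg hpr]
            exact hbase
      · intro x y hx hy
        rw [SameR_congr hpres hx hy]
        constructor
        · exact fun h => Or.inl h
        · rintro (h | ⟨h1', h2'⟩ | ⟨h1', h2'⟩)
          · exact h
          · exact SameR_trans (SameR_trans h1' huv) (SameR_symm h2')
          · exact SameR_trans (SameR_trans h1' (SameR_symm huv)) (SameR_symm h2')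
    · -- distinct roots of equal rank: par[rv] := ru, rank[ru] += 1
      have hreset : ∀ y, IR L y → ∀ s,
          (Root (PySem.List.pySetD (ufFind fuel (ufFind fuel par u).1 v).1 rv ru) y s ↔
            ∃ t, Root par y t ∧ s = if t = rv then ru else t) := by
        intro y hy s
        refine (Root_reset_iff hrc2 hruIR hrvIR hfix2u hfix2v hrr hy).trans ?_
        constructor
        · rintro ⟨t, ht, hts⟩
          exact ⟨t, (hT2 y hy t).1 ht, hts⟩
        · rintro ⟨t, ht, hts⟩
          exact ⟨t, (hT2 y hy t).2 ht, hts⟩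
      refine ⟨RC_set hrc2 hrvIR hruIR, ?_, hRKB, hlrk', ?_⟩
      · intro y hy hney
        rw [hgpar y hy.1] at hney ⊢
        by_cases hyr : y = rv
        · rw [if_pos hyr] at hney ⊢
          rw [hgrk ru hruIR.1, if_pos rfl, hgrk y hy.1,
            if_neg (fun e : y = ru => hrr (e.symm.trans hyr))]
          rw [hyr]
          omega
        · rw [if_neg hyr] at hney ⊢
          have hbase := hrkc2 y hy hney
          have hyru : y ≠ ru := by
            intro e
            exact hney (by rw [e]; exact hfix2u)
          rw [hgrk y hy.1, if_neg hyru]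
          by_cases hpr : pg (ufFind fuel (ufFind fuel par u).1 v).1 y = ru
          · rw [hgrk _ (le_trans hruIR.1 (le_of_eq hpr.symm)), if_pos hpr]
            rw [hpr] at hbase
            omega
          · rw [hgrk _ (hrc2.2 y hy).1, if_neg hpr]
            exact hbase
      · intro x y hx hy
        exact SameR_merge_iff hreset hRu hRv (Or.inl ⟨rfl, rfl⟩) hrr htot hx hy
  · -- rank[rv] < rank[ru] : par[rv] := ru
    have hne : ru ≠ rv := fun e => h2 (by rw [e])
    have hreset : ∀ y, IR L y → ∀ s,
        (Root (PySem.List.pySetD (ufFind fuel (ufFind fuel par u).1 v).1 rv ru) y s ↔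
          ∃ t, Root par y t ∧ s = if t = rv then ru else t) := by
      intro y hy s
      refine (Root_reset_iff hrc2 hruIR hrvIR hfix2u hfix2v hne hy).trans ?_
      constructor
      · rintro ⟨t, ht, hts⟩
        exact ⟨t, (hT2 y hy t).1 ht, hts⟩
      · rintro ⟨t, ht, hts⟩
        exact ⟨t, (hT2 y hy t).2 ht, hts⟩
    refine ⟨RC_set hrc2 hrvIR hruIR, ?_, ?_, hlrk, ?_⟩
    · intro y hy hney
      have hgy : pg (PySem.List.pySetD (ufFind fuel (ufFind fuel par u).1 v).1 rv ru) y
          = if y = rv then ru else pg (ufFind fuel (ufFind fuel par u).1 v).1 y :=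
        pg_set _ rv ru hrvIR.1 (by rw [hlen2]; exact hrvIR.2) y hy.1
      rw [hgy] at hney ⊢
      by_cases hyr : y = rv
      · rw [if_pos hyr]
        rw [hyr]
        show pg rank rv < pg rank ru
        have hb1 := hrkb ru hruIR
        have hb2 := hrkb rv hrvIR
        omega
      · rw [if_neg hyr] at hney ⊢
        exact hrkc2 y hy hney
    · intro y hy
      exact ⟨(hrkb y hy).1, le_trans (hrkb y hy).2 (by omega)⟩
    · intro x y hx hy
      exact SameR_merge_iff hreset hRu hRv (Or.inl ⟨rfl, rfl⟩) hne htot hx hy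

lemma check_spec {L : Nat} :
    ∀ (is : List Int) (par rank comp : List Int) (c : Int) (fuel : Nat),
      RC L par → RKC L par rank → RKB L rank c → (c + 1).toNat + 1 ≤ fuel → IR L 1 →
      (∀ i ∈ is, IR L i) →
      (∀ i ∈ is, (SameR par 1 i ↔ pg comp i = pg comp 1)) →
      solveCheck fuel par is =
        (if is.all (fun i => decide (PySem.List.pyGetD comp i 0 = PySem.List.pyGetD comp 1 0))
         then "Yes" else "No") := by
  intro is
  induction is with
  | nil => intro par rank comp c fuel _ _ _ _ _ _ _; simp [solveCheck]
  | cons i rest ih =>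
    intro par rank comp c fuel hrc hrkc hrkb hfuel h1 hall hlink
    obtain ⟨r1, hc1⟩ := chainRoot_fuel hrc hrkc hrkb h1 hfuel
    obtain ⟨hval1, hrc1, hpres1, hrkc1f⟩ := find_spec fuel par 1 r1 hrc h1 hc1
    have hrkc1 := hrkc1f rank hrkc
    have hiIR : IR L i := hall i (List.mem_cons_self)
    obtain ⟨r2, hc2⟩ := chainRoot_fuel hrc1 hrkc1 hrkb hiIR hfuel
    obtain ⟨hval2, hrc2, hpres2, hrkc2f⟩ :=
      find_spec fuel (ufFind fuel par 1).1 i r2 hrc1 hiIR hc2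
    have hR1 : Root par 1 r1 := ⟨fuel, hc1⟩
    have hRi : Root par i r2 := (hpres1 i hiIR r2).1 ⟨fuel, hc2⟩
    have hiff : r1 = r2 ↔ SameR par 1 i := by
      constructor
      · intro h
        exact ⟨r1, hR1, h ▸ hRi⟩
      · rintro ⟨r, ha, hb⟩
        have e1 : r = r1 := Root_unique ha hR1
        have e2 : r = r2 := Root_unique hb hRi
        omega
    have heq : solveCheck fuel par (i :: rest) =
        if (ufFind fuel par 1).2 = (ufFind fuel (ufFind fuel par 1).1 i).2 then
          solveCheck fuel (ufFind fuel (ufFind fuel par 1).1 i).1 rest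
        else "No" := rfl
    rw [heq, hval1, hval2]
    by_cases hr : r1 = r2
    · rw [if_pos hr]
      have hlabel : PySem.List.pyGetD comp i 0 = PySem.List.pyGetD comp 1 0 :=
        (hlink i (List.mem_cons_self)).1 (hiff.1 hr)
      have hT2 : ∀ y, IR L y → ∀ s,
          (Root (ufFind fuel (ufFind fuel par 1).1 i).1 y s ↔ Root par y s) :=
        fun y hy s => (hpres2 y hy s).trans (hpres1 y hy s)
      rw [ih (ufFind fuel (ufFind fuel par 1).1 i).1 rank comp c fuel hrc2
        (hrkc2f rank hrkc1) hrkb hfuel h1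
        (fun j hj => hall j (List.mem_cons_of_mem _ hj))
        (fun j hj => (SameR_congr hT2 h1 (hall j (List.mem_cons_of_mem _ hj))).trans
          (hlink j (List.mem_cons_of_mem _ hj)))]
      simp [List.all_cons, hlabel]
    · rw [if_neg hr]
      have hlabel : ¬ (PySem.List.pyGetD comp i 0 = PySem.List.pyGetD comp 1 0) :=
        fun h => hr (hiff.2 ((hlink i (List.mem_cons_self)).2 h))
      simp [List.all_cons, hlabel]

-- ===== the edge fold: union-find classes = relabelled component labels =====

def IRn (n x : Int) : Prop := 0 ≤ x ∧ x ≤ n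

def Link (n : Int) (par comp : List Int) : Prop :=
  ∀ x y, IRn n x → IRn n y → (SameR par x y ↔ pg comp x = pg comp y)

lemma pg_map_if (comp : List Int) (cu cv x : Int) (h0 : 0 ≤ x) (h : x < (comp.length : Int)) :
    pg (comp.map (fun z => if z = cv then cu else z)) x = (if pg comp x = cv then cu else pg comp x) := by
  unfold pg
  rw [PySem.List.pyGetD_eq_getElem comp 0 h0 h,
    PySem.List.pyGetD_eq_getElem (comp.map (fun z => if z = cv then cu else z)) 0 h0
      (by rw [List.length_map]; exact h),
    List.getElem_map]

lemma fold_inv {n : Int} (hn : 0 ≤ n) :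
    ∀ (edges : List (Int × Int)) (par rank comp : List Int) (c : Int) (fuel : Nat),
      (∀ p ∈ edges, IRn n p.1 ∧ IRn n p.2) →
      RC (n + 2).toNat par → RKC (n + 2).toNat par rank → RKB (n + 2).toNat rank c →
      rank.length = (n + 2).toNat → comp.length = (n + 1).toNat → 0 ≤ c →
      (c + 1).toNat + 1 + edges.length ≤ fuel →
      Link n par comp →
      RC (n + 2).toNat (edges.foldl (fun s p => ufUnion fuel s.1 s.2 p.1 p.2) (par, rank)).1 ∧
      RKC (n + 2).toNat (edges.foldl (fun s p => ufUnion fuel s.1 s.2 p.1 p.2) (par, rank)).1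
        (edges.foldl (fun s p => ufUnion fuel s.1 s.2 p.1 p.2) (par, rank)).2 ∧
      RKB (n + 2).toNat (edges.foldl (fun s p => ufUnion fuel s.1 s.2 p.1 p.2) (par, rank)).2
        (c + edges.length) ∧
      (edges.foldl (fun c' p =>
          let cu := PySem.List.pyGetD c' p.1 0
          let cv := PySem.List.pyGetD c' p.2 0
          if cu ≠ cv then c'.map (fun x => if x = cv then cu else x) else c') comp).length
        = (n + 1).toNat ∧
      Link n (edges.foldl (fun s p => ufUnion fuel s.1 s.2 p.1 p.2) (par, rank)).1
        (edges.foldl (fun c' p =>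
          let cu := PySem.List.pyGetD c' p.1 0
          let cv := PySem.List.pyGetD c' p.2 0
          if cu ≠ cv then c'.map (fun x => if x = cv then cu else x) else c') comp) := by
  intro edges
  induction edges with
  | nil =>
    intro par rank comp c fuel hE hrc hrkc hrkb hlrk hclen hc hfuel hlink
    simp only [List.foldl_nil, List.length_nil]
    exact ⟨hrc, hrkc, by simpa using hrkb, hclen, hlink⟩
  | cons p t ih =>
    intro par rank comp c fuel hE hrc hrkc hrkb hlrk hclen hc hfuel hlink
    have hp := hE p (List.mem_cons_self)
    have hN2 : (((n + 2).toNat : Nat) : Int) = n + 2 := by omega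
    have hN1 : (((n + 1).toNat : Nat) : Int) = n + 1 := by omega
    have huIR : IR (n + 2).toNat p.1 := ⟨hp.1.1, by rw [hN2]; have := hp.1.2; omega⟩
    have hvIR : IR (n + 2).toNat p.2 := ⟨hp.2.1, by rw [hN2]; have := hp.2.2; omega⟩
    have hfuel1 : (c + 1).toNat + 1 ≤ fuel := by
      simp only [List.length_cons] at hfuel; omega
    have hfuel' : ((c + 1) + 1).toNat + 1 + t.length ≤ fuel := by
      simp only [List.length_cons] at hfuel; omega
    obtain ⟨hrc', hrkc', hrkb', hlrk', hrel⟩ := union_spec hrc hrkc hrkb hlrk huIR hvIR hfuel1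
    have hIRconv : ∀ z, IRn n z → IR (n + 2).toNat z := fun z hz =>
      ⟨hz.1, by rw [hN2]; have := hz.2; omega⟩
    simp only [List.foldl_cons, List.length_cons]
    have hcast : c + ((t.length + 1 : Nat) : Int) = (c + 1) + (t.length : Int) := by
      push_cast; ring
    rw [hcast]
    by_cases hcc : PySem.List.pyGetD comp p.1 0 = PySem.List.pyGetD comp p.2 0
    · have hBstep : (if (PySem.List.pyGetD comp p.1 0 ≠ PySem.List.pyGetD comp p.2 0) then
          comp.map (fun x => if x = PySem.List.pyGetD comp p.2 0
            then PySem.List.pyGetD comp p.1 0 else x)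
          else comp) = comp := if_neg (not_not_intro hcc)
      rw [hBstep]
      have huv : SameR par p.1 p.2 := (hlink p.1 p.2 hp.1 hp.2).2 hcc
      have hlink' : Link n (ufUnion fuel par rank p.1 p.2).1 comp := by
        intro x y hx hy
        rw [hrel x y (hIRconv x hx) (hIRconv y hy)]
        constructor
        · rintro (h | ⟨ha, hb⟩ | ⟨ha, hb⟩)
          · exact (hlink x y hx hy).1 h
          · exact (hlink x y hx hy).1 (SameR_trans (SameR_trans ha huv) (SameR_symm hb))
          · exact (hlink x y hx hy).1
              (SameR_trans (SameR_trans ha (SameR_symm huv)) (SameR_symm hb))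
        · exact fun h => Or.inl ((hlink x y hx hy).2 h)
      exact ih (ufUnion fuel par rank p.1 p.2).1 (ufUnion fuel par rank p.1 p.2).2 comp
        (c + 1) fuel (fun q hq => hE q (List.mem_cons_of_mem _ hq)) hrc' hrkc' hrkb' hlrk'
        hclen (by omega) hfuel' hlink'
    · have hBstep : (if (PySem.List.pyGetD comp p.1 0 ≠ PySem.List.pyGetD comp p.2 0) then
          comp.map (fun x => if x = PySem.List.pyGetD comp p.2 0
            then PySem.List.pyGetD comp p.1 0 else x)
          else comp) = comp.map (fun x => if x = PySem.List.pyGetD comp p.2 0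
            then PySem.List.pyGetD comp p.1 0 else x) := if_pos hcc
      rw [hBstep]
      have hLab : ∀ z, IRn n z →
          pg (comp.map (fun x => if x = PySem.List.pyGetD comp p.2 0
              then PySem.List.pyGetD comp p.1 0 else x)) z
            = if pg comp z = pg comp p.2 then pg comp p.1 else pg comp z := by
        intro z hz
        exact pg_map_if comp _ _ z hz.1 (by rw [hclen, hN1]; have := hz.2; omega)
      have hlink' : Link n (ufUnion fuel par rank p.1 p.2).1
          (comp.map (fun x => if x = PySem.List.pyGetD comp p.2 0
            then PySem.List.pyGetD comp p.1 0 else x)) := by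
        intro x y hx hy
        rw [hrel x y (hIRconv x hx) (hIRconv y hy), hlink x y hx hy, hlink x p.1 hx hp.1,
          hlink y p.2 hy hp.2, hlink x p.2 hx hp.2, hlink y p.1 hy hp.1,
          hLab x hx, hLab y hy, label_merge (pg comp p.1) (pg comp p.2) _ _ hcc]
      exact ih (ufUnion fuel par rank p.1 p.2).1 (ufUnion fuel par rank p.1 p.2).2
        (comp.map (fun x => if x = PySem.List.pyGetD comp p.2 0
          then PySem.List.pyGetD comp p.1 0 else x))
        (c + 1) fuel (fun q hq => hE q (List.mem_cons_of_mem _ hq)) hrc' hrkc' hrkb' hlrk'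
        (by rw [List.length_map]; exact hclen) (by omega) hfuel' hlink'

-- ===== the degree guard: max(array) > 2 ↔ some dict value > 2 =====

lemma deg_len (xs : List Int) : ∀ (d : List Int),
    (xs.foldl (fun d x => PySem.List.pySetD d x (PySem.List.pyGetD d x 0 + 1)) d).length = d.length := by
  induction xs with
  | nil => intro d; rfl
  | cons x t ih =>
    intro d
    simp only [List.foldl_cons]
    rw [ih]
    exact PySem.List.length_pySetD _ _ _

lemma deg_get (xs : List Int) : ∀ (d : List Int),
    (∀ x ∈ xs, 0 ≤ x ∧ x < (d.length : Int)) → ∀ i, 0 ≤ i →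
      pg (xs.foldl (fun d x => PySem.List.pySetD d x (PySem.List.pyGetD d x 0 + 1)) d) i
        = pg d i + (xs.count i : Int) := by
  induction xs with
  | nil => intro d _ i _; simp
  | cons x t ih =>
    intro d hb i hi
    simp only [List.foldl_cons]
    have hx := hb x (List.mem_cons_self)
    rw [ih (PySem.List.pySetD d x (PySem.List.pyGetD d x 0 + 1))
      (fun z hz => by rw [PySem.List.length_pySetD]; exact hb z (List.mem_cons_of_mem _ hz)) i hi]
    have hset : pg (PySem.List.pySetD d x (PySem.List.pyGetD d x 0 + 1)) i
        = if i = x then PySem.List.pyGetD d x 0 + 1 else pg d i :=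
      pg_set d x _ hx.1 hx.2 i hi
    rw [hset]
    by_cases hix : i = x
    · rw [if_pos hix, hix]
      have hc : (x :: t).count x = t.count x + 1 := by simp
      rw [hc]
      show PySem.List.pyGetD d x 0 + 1 + (t.count x : Int) = pg d x + ((t.count x + 1 : Nat) : Int)
      push_cast
      show pg d x + 1 + (t.count x : Int) = pg d x + ((t.count x : Int) + 1)
      ring
    · rw [if_neg hix]
      have hc : (x :: t).count i = t.count i := by simp [Ne.symm hix]
      rw [hc]

lemma max_gt2_iff (degree : List Int) (hne : degree ≠ []) :
    ((PySem.List.max? degree (fun x => x)).getD 0 > 2) ↔ ∃ z ∈ degree, z > 2 := by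
  cases hm : PySem.List.max? degree (fun x => x) with
  | none => exact absurd ((PySem.List.max?_eq_none_iff degree _).1 hm) hne
  | some m =>
    simp only [Option.getD]
    constructor
    · intro h
      exact ⟨m, PySem.List.max?_mem hm, h⟩
    · rintro ⟨z, hz, hz2⟩
      have := PySem.List.max?_isMax hm z hz
      omega

lemma guard_A_iff {n : Int} (hn : 0 ≤ n) (E : List Int) (hE : ∀ x ∈ E, IRn n x) :
    ((PySem.List.max? (E.foldl (fun d x => PySem.List.pySetD d x (PySem.List.pyGetD d x 0 + 1))
        (List.replicate (n + 1).toNat (0 : Int))) (fun x => x)).getD 0 > 2)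
      ↔ ∃ x ∈ E, (E.count x : Int) > 2 := by
  have hN1 : (((n + 1).toNat : Nat) : Int) = n + 1 := by omega
  have hlen : (E.foldl (fun d x => PySem.List.pySetD d x (PySem.List.pyGetD d x 0 + 1))
      (List.replicate (n + 1).toNat (0 : Int))).length = (n + 1).toNat := by
    rw [deg_len, List.length_replicate]
  have hb : ∀ x ∈ E, 0 ≤ x ∧ x < ((List.replicate (n + 1).toNat (0 : Int)).length : Int) := by
    intro x hx
    have := hE x hx
    refine ⟨this.1, ?_⟩
    rw [List.length_replicate, hN1]
    have := this.2
    omega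
  have hget : ∀ i : Int, 0 ≤ i →
      pg (E.foldl (fun d x => PySem.List.pySetD d x (PySem.List.pyGetD d x 0 + 1))
        (List.replicate (n + 1).toNat (0 : Int))) i = (E.count i : Int) := by
    intro i hi
    rw [deg_get E _ hb i hi, pg_repl0 _ i hi]
    omega
  have hne : (E.foldl (fun d x => PySem.List.pySetD d x (PySem.List.pyGetD d x 0 + 1))
      (List.replicate (n + 1).toNat (0 : Int))) ≠ [] := by
    intro h
    rw [h] at hlen
    simp at hlen
    omega
  rw [max_gt2_iff _ hne]
  constructor
  · rintro ⟨z, hz, hz2⟩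
    obtain ⟨k, hk, hkz⟩ := List.getElem_of_mem hz
    have hkint : pg (E.foldl (fun d x => PySem.List.pySetD d x (PySem.List.pyGetD d x 0 + 1))
        (List.replicate (n + 1).toNat (0 : Int))) (k : Int) = z := by
      unfold pg
      rw [PySem.List.pyGetD_eq_getElem _ 0 (by positivity) (by exact_mod_cast hk)]
      simpa using hkz
    have hcnt : (E.count ((k : Nat) : Int) : Int) > 2 := by
      rw [← hget (k : Int) (by positivity), hkint]
      exact hz2
    refine ⟨((k : Nat) : Int), ?_, hcnt⟩
    have hpos : 0 < E.count ((k : Nat) : Int) := by omega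
    exact List.count_pos_iff.1 hpos
  · rintro ⟨x, hxE, hc⟩
    have hx := hE x hxE
    have hxlt : x.toNat < (E.foldl (fun d x => PySem.List.pySetD d x (PySem.List.pyGetD d x 0 + 1))
        (List.replicate (n + 1).toNat (0 : Int))).length := by
      rw [hlen]
      have := hx.2
      omega
    refine ⟨_, List.getElem_mem hxlt, ?_⟩
    have hpgx : pg (E.foldl (fun d x => PySem.List.pySetD d x (PySem.List.pyGetD d x 0 + 1))
        (List.replicate (n + 1).toNat (0 : Int))) x
        = (E.foldl (fun d x => PySem.List.pySetD d x (PySem.List.pyGetD d x 0 + 1))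
          (List.replicate (n + 1).toNat (0 : Int)))[x.toNat] := by
      unfold pg
      exact PySem.List.pyGetD_eq_getElem _ 0 hx.1 (by rw [hlen, hN1]; have := hx.2; omega)
    rw [← hpgx, hget x hx.1]
    exact hc

lemma guard_B_iff (E : List Int) :
    ((PySem.Dict.values (E.foldl (fun d x => d.insert x (d.getD x 0 + 1)) (PySem.Dict.empty : PySem.Dict Int Int))).any
        (fun dv => dv > 2) = true)
      ↔ ∃ x ∈ E, (E.count x : Int) > 2 := by
  rw [PySem.Dict.foldl_insert_getD_add_one_eq_counter E]
  have hval : (PySem.Dict.counter E).values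
      = (PySem.Set.ofList E).map (fun k => ((E.count k : Nat) : Int)) := by
    show ((PySem.Dict.counter E).items.map Prod.snd) = _
    rw [PySem.Dict.items_counter E, List.map_map]
    rfl
  rw [hval]
  constructor
  · intro h
    obtain ⟨dv, hdv, hdv2⟩ := List.any_eq_true.mp h
    obtain ⟨x, hxS, rfl⟩ := List.mem_map.mp hdv
    exact ⟨x, (PySem.Set.mem_ofList E x).1 hxS, by simpa using hdv2⟩
  · rintro ⟨x, hxE, hc⟩
    refine List.any_eq_true.mpr ⟨((E.count x : Nat) : Int), ?_, by simpa using hc⟩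
    exact List.mem_map.mpr ⟨x, (PySem.Set.mem_ofList E x).2 hxE, rfl⟩

-- ===== VERDICT (by name: the statement is the Claim_ definition above) =====
theorem solve_spec : Claim_equal_solve := by
  unfold Claim_equal_solve
  intro n m uv hdom hpre
  unfold Spec_solve
  have hA : solve n m uv =
      (if m ≠ n - 1 then "No"
       else
        if ((PySem.List.max? (uv.foldl (fun d p =>
            PySem.List.pySetD (PySem.List.pySetD d p.1 (PySem.List.pyGetD d p.1 0 + 1)) p.2
              (PySem.List.pyGetD (PySem.List.pySetD d p.1 (PySem.List.pyGetD d p.1 0 + 1)) p.2 0 + 1))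
            (List.replicate (n + 1).toNat (0 : Int))) (fun x => x)).getD 0) > 2 then "No"
        else solveCheck (uv.length + (n + 2).toNat + 2)
          (uv.foldl (fun s p => ufUnion (uv.length + (n + 2).toNat + 2) s.1 s.2 p.1 p.2)
            (PySem.List.pyRange 0 (n + 2) 1, List.replicate (n + 2).toNat (0 : Int))).1
          (PySem.List.pyRange 2 (n + 1) 1)) := rfl
  have hB : solve_alt n m uv =
      (if m ≠ n - 1 then "No"
       else
        if (PySem.Dict.values (uv.foldl (fun d p =>
              [p.1, p.2].foldl (fun d x => d.insert x (d.getD x 0 + 1)) d)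
              (PySem.Dict.empty : PySem.Dict Int Int))).any (fun dv => dv > 2) then "No"
        else
          if (PySem.List.pyRange 2 (n + 1) 1).all (fun i =>
              decide (PySem.List.pyGetD (uv.foldl (fun c p =>
                  let cu := PySem.List.pyGetD c p.1 0
                  let cv := PySem.List.pyGetD c p.2 0
                  if cu ≠ cv then c.map (fun x => if x = cv then cu else x) else c)
                (PySem.List.pyRange 0 (n + 1) 1)) i 0
                = PySem.List.pyGetD (uv.foldl (fun c p =>
                  let cu := PySem.List.pyGetD c p.1 0
                  let cv := PySem.List.pyGetD c p.2 0
                  if cu ≠ cv then c.map (fun x => if x = cv then cu else x) else c)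
                (PySem.List.pyRange 0 (n + 1) 1)) 1 0))
          then "Yes" else "No") := rfl
  rw [hA, hB]
  by_cases hm : m = n - 1
  · rw [if_neg (not_not_intro hm), if_neg (not_not_intro hm)]
    rcases hpre with h | ⟨hn, hlab⟩
    · exact absurd hm h
    have hN2 : (((n + 2).toNat : Nat) : Int) = n + 2 := by omega
    have hN1 : (((n + 1).toNat : Nat) : Int) = n + 1 := by omega
    have hEmem : ∀ x ∈ uv.flatMap (fun p => [p.1, p.2]), IRn n x := by
      intro x hx
      obtain ⟨p, hp, hxp⟩ := List.mem_flatMap.mp hx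
      have := hlab p hp
      rcases List.mem_cons.mp hxp with rfl | hxp2
      · exact ⟨this.1, this.2.1⟩
      · rcases List.mem_cons.mp hxp2 with rfl | hxp3
        · exact ⟨this.2.2.1, this.2.2.2⟩
        · exact absurd hxp3 (List.not_mem_nil)
    have hreshapeA : uv.foldl (fun d p =>
          PySem.List.pySetD (PySem.List.pySetD d p.1 (PySem.List.pyGetD d p.1 0 + 1)) p.2
            (PySem.List.pyGetD (PySem.List.pySetD d p.1 (PySem.List.pyGetD d p.1 0 + 1)) p.2 0 + 1))
          (List.replicate (n + 1).toNat (0 : Int))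
        = (uv.flatMap (fun p => [p.1, p.2])).foldl
            (fun d x => PySem.List.pySetD d x (PySem.List.pyGetD d x 0 + 1))
            (List.replicate (n + 1).toNat (0 : Int)) := by
      rw [List.foldl_flatMap]
      simp only [List.foldl_cons, List.foldl_nil]
    have hreshapeB : (uv.foldl (fun d p =>
          [p.1, p.2].foldl (fun d x => d.insert x (d.getD x 0 + 1)) d)
          (PySem.Dict.empty : PySem.Dict Int Int))
        = (uv.flatMap (fun p => [p.1, p.2])).foldl
            (fun d x => d.insert x (d.getD x 0 + 1)) (PySem.Dict.empty : PySem.Dict Int Int) := by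
      rw [List.foldl_flatMap]
    rw [hreshapeA, hreshapeB]
    by_cases hg : ∃ x ∈ uv.flatMap (fun p => [p.1, p.2]),
        ((uv.flatMap (fun p => [p.1, p.2])).count x : Int) > 2
    · rw [if_pos ((guard_A_iff hn _ hEmem).2 hg), if_pos ((guard_B_iff _).2 hg)]
    · rw [if_neg (fun h => hg ((guard_A_iff hn _ hEmem).1 h)),
        if_neg (fun h => hg ((guard_B_iff _).1 h))]
      -- connectivity: union-find classes coincide with the relabelled component labels
      have hrc0 : RC (n + 2).toNat (PySem.List.pyRange 0 (n + 2) 1) := by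
        constructor
        · rw [PySem.List.length_pyRange_one]
          omega
        · intro x hx
          rw [pg_range0 (n + 2) x hx.1 (by rw [← hN2]; exact hx.2)]
          exact hx
      have hpg0 : ∀ x : Int, IR (n + 2).toNat x → pg (PySem.List.pyRange 0 (n + 2) 1) x = x :=
        fun x hx => pg_range0 (n + 2) x hx.1 (by rw [← hN2]; exact hx.2)
      have hrkc0 : RKC (n + 2).toNat (PySem.List.pyRange 0 (n + 2) 1)
          (List.replicate (n + 2).toNat (0 : Int)) := by
        intro x hx hne
        exact absurd (hpg0 x hx) hne
      have hrkb0 : RKB (n + 2).toNat (List.replicate (n + 2).toNat (0 : Int)) 0 := by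
        intro x hx
        rw [pg_repl0 _ x hx.1]
        omega
      have hclen0 : (PySem.List.pyRange 0 (n + 1) 1).length = (n + 1).toNat := by
        rw [PySem.List.length_pyRange_one]
        omega
      have hcomp0 : ∀ z : Int, IRn n z → pg (PySem.List.pyRange 0 (n + 1) 1) z = z :=
        fun z hz => pg_range0 (n + 1) z hz.1 (by have := hz.2; omega)
      have hIRconv : ∀ z, IRn n z → IR (n + 2).toNat z := fun z hz =>
        ⟨hz.1, by rw [hN2]; have := hz.2; omega⟩
      have hlink0 : Link n (PySem.List.pyRange 0 (n + 2) 1) (PySem.List.pyRange 0 (n + 1) 1) := by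
        intro x y hx hy
        rw [hcomp0 x hx, hcomp0 y hy]
        constructor
        · rintro ⟨r, h1, h2⟩
          have e1 : r = x := Root_of_fix (hpg0 x (hIRconv x hx)) h1
          have e2 : r = y := Root_of_fix (hpg0 y (hIRconv y hy)) h2
          omega
        · intro h
          subst h
          exact ⟨x, Root_self (hpg0 x (hIRconv x hx)), Root_self (hpg0 x (hIRconv x hx))⟩
      have hE' : ∀ p ∈ uv, IRn n p.1 ∧ IRn n p.2 := by
        intro p hp
        have := hlab p hp
        exact ⟨⟨this.1, this.2.1⟩, ⟨this.2.2.1, this.2.2.2⟩⟩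
      have hfuel0 : (0 + 1 : Int).toNat + 1 + uv.length ≤ uv.length + (n + 2).toNat + 2 := by
        omega
      obtain ⟨hrcF, hrkcF, hrkbF, hclenF, hlinkF⟩ :=
        fold_inv hn uv (PySem.List.pyRange 0 (n + 2) 1) (List.replicate (n + 2).toNat (0 : Int))
          (PySem.List.pyRange 0 (n + 1) 1) 0 (uv.length + (n + 2).toNat + 2) hE' hrc0 hrkc0 hrkb0
          (by rw [List.length_replicate]) hclen0 (le_refl 0) hfuel0 hlink0
      have h1IR : IR (n + 2).toNat 1 := ⟨by omega, by rw [hN2]; omega⟩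
      have hallIR : ∀ i ∈ PySem.List.pyRange 2 (n + 1) 1, IR (n + 2).toNat i := by
        intro i hi
        have := PySem.List.mem_pyRange_one.mp hi
        exact ⟨by omega, by rw [hN2]; omega⟩
      have hlinkcheck : ∀ i ∈ PySem.List.pyRange 2 (n + 1) 1,
          (SameR (uv.foldl (fun s p => ufUnion (uv.length + (n + 2).toNat + 2) s.1 s.2 p.1 p.2)
              (PySem.List.pyRange 0 (n + 2) 1, List.replicate (n + 2).toNat (0 : Int))).1 1 i ↔
            pg (uv.foldl (fun c p =>
                let cu := PySem.List.pyGetD c p.1 0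
                let cv := PySem.List.pyGetD c p.2 0
                if cu ≠ cv then c.map (fun x => if x = cv then cu else x) else c)
              (PySem.List.pyRange 0 (n + 1) 1)) i
              = pg (uv.foldl (fun c p =>
                let cu := PySem.List.pyGetD c p.1 0
                let cv := PySem.List.pyGetD c p.2 0
                if cu ≠ cv then c.map (fun x => if x = cv then cu else x) else c)
              (PySem.List.pyRange 0 (n + 1) 1)) 1) := by
        intro i hi
        have hmem := PySem.List.mem_pyRange_one.mp hi
        have h1n : IRn n 1 := ⟨by omega, by omega⟩
        have hin : IRn n i := ⟨by omega, by omega⟩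
        exact (hlinkF 1 i h1n hin).trans eq_comm
      have hfuelc : ((0 + (uv.length : Int)) + 1).toNat + 1 ≤ uv.length + (n + 2).toNat + 2 := by
        omega
      exact check_spec (PySem.List.pyRange 2 (n + 1) 1) _ _ _ (0 + (uv.length : Int))
        (uv.length + (n + 2).toNat + 2) hrcF hrkcF hrkbF hfuelc h1IR hallIR hlinkcheck
  · rw [if_pos hm, if_pos hm]
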